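-- pv_equiv track=rewrite | github.com/psligti/ash-hawk | ash_hawk/graders/validity.py | _extract_message
-- ===== SOURCE A (Python) =====
-- def _extract_message(error_text: str) -> str:
--     for line in error_text.strip().split("\n"):
--         line = line.strip()
--         if (
--             not line
--             or line.startswith("Traceback")
--             or line.startswith("File ")
--             or line.startswith("During handling")
--         ):
--             continue
--         return line[:200]
--     for line in error_text.strip().split("\n"):
--         line = line.strip()
--         if line:
--             return line[:200]
--     return "Unknown error"
-- ===== SOURCE B (Python) =====
-- def _extract_message(error_text: str) -> str:
--     fallback = None
--     for line in error_text.strip().split("\n"):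
--         line = line.strip()
--         if not line:
--             continue
--         if not (
--             line.startswith("Traceback")
--             or line.startswith("File ")
--             or line.startswith("During handling")
--         ):
--             return line[:200]
--         if fallback is None:
--             fallback = line
--     return fallback[:200] if fallback is not None else "Unknown error"
-- ===== Notes on version B (the rewrite author's own statement) =====
-- stated objective: simpler
-- what changed: Single pass carrying an optional fallback (first non-empty line) instead of two full scans of the split lines.
import Mathlib
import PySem

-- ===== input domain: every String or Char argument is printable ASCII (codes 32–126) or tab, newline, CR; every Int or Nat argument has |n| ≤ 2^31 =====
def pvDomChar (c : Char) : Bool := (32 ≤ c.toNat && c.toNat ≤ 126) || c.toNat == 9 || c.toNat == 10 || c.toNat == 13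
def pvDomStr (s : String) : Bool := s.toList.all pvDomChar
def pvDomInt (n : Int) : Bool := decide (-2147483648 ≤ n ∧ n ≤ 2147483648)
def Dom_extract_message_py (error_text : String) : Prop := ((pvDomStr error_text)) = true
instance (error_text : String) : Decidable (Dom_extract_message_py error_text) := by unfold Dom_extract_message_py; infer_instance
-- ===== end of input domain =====

-- B replaces A's two scans of the split lines by a single pass that carries the
-- first non-empty line as an optional fallback; same return value everywhere.

-- ===== PORT A =====
-- first loop of A: first stripped non-empty line not starting with a traceback prefix
def pvLoopA1 : List String → Option String
  | [] => none
  | l :: ls =>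
    let line := PySem.Str.strip l
    if line = "" || PySem.Str.startswith line "Traceback"
        || PySem.Str.startswith line "File " || PySem.Str.startswith line "During handling" then
      pvLoopA1 ls
    else
      some (PySem.Str.slice line none (some 200))

-- second loop of A: first stripped non-empty line
def pvLoopA2 : List String → Option String
  | [] => none
  | l :: ls =>
    let line := PySem.Str.strip l
    if line ≠ "" then some (PySem.Str.slice line none (some 200)) else pvLoopA2 ls

def extract_message_py (error_text : String) : String :=
  let lines := (PySem.Str.split? (PySem.Str.strip error_text) "\n").getD []
  match pvLoopA1 lines with
  | some r => r
  | none =>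
    match pvLoopA2 lines with
    | some r => r
    | none => "Unknown error"

-- ===== PORT B =====
-- B's single pass: fb is the recorded fallback (first non-empty line seen so far)
def pvLoopB : List String → Option String → String
  | [], fb =>
    match fb with
    | some f => PySem.Str.slice f none (some 200)
    | none => "Unknown error"
  | l :: ls, fb =>
    let line := PySem.Str.strip l
    if line = "" then pvLoopB ls fb
    else if PySem.Str.startswith line "Traceback"
        || PySem.Str.startswith line "File " || PySem.Str.startswith line "During handling" then
      pvLoopB ls (if fb.isNone then some line else fb)
    else
      PySem.Str.slice line none (some 200)

def extract_message_py_alt (error_text : String) : String :=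
  pvLoopB ((PySem.Str.split? (PySem.Str.strip error_text) "\n").getD []) none

-- ===== PRECONDITION & SPEC =====
def Spec_extract_message_py (error_text : String) (out : String) : Prop := out = extract_message_py_alt error_text
instance (error_text : String) (out : String) : Decidable (Spec_extract_message_py error_text out) := by unfold Spec_extract_message_py; infer_instance

-- ===== CLAIM (what is proved, stated in full; the proofs are below) =====
def Claim_equal_extract_message_py : Prop := ∀ (error_text : String), Dom_extract_message_py error_text → Spec_extract_message_py error_text (extract_message_py error_text)

-- ===== LEMMAS AND PROOFS =====
lemma pvLoopB_eq (ls : List String) (fb : Option String) :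
    pvLoopB ls fb =
      match pvLoopA1 ls with
      | some r => r
      | none =>
        match fb with
        | some f => PySem.Str.slice f none (some 200)
        | none =>
          match pvLoopA2 ls with
          | some r => r
          | none => "Unknown error" := by
  induction ls generalizing fb with
  | nil => cases fb <;> simp [pvLoopB, pvLoopA1, pvLoopA2]
  | cons l ls ih =>
    simp only [pvLoopB, pvLoopA1, pvLoopA2]
    by_cases h0 : PySem.Str.strip l = ""
    · simp [h0, ih]
    · by_cases h1 : (PySem.Str.startswith (PySem.Str.strip l) "Traceback"
          || PySem.Str.startswith (PySem.Str.strip l) "File "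
          || PySem.Str.startswith (PySem.Str.strip l) "During handling") = true
      · simp at h1
        cases fb <;> simp [h0, h1, ih]
      · simp at h1
        simp [h0, h1]

-- ===== VERDICT (by name: the statement is the Claim_ definition above) =====
theorem extract_message_py_spec : Claim_equal_extract_message_py := by
  intro s _
  unfold Spec_extract_message_py extract_message_py extract_message_py_alt
  rw [pvLoopB_eq]
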